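-- pv_equiv track=rewrite | github.com/PitterPatterPython/jupyter_integration_base | jupyter_integrations_utility/feat_calc.py | ret_custom_clause_group
-- ===== SOURCE A (Python) =====
-- def parse_custom_clause(cclause):
--     """ {"name": "parse_custom_clause",
--          "desc": "Parse a custom clause into its component parts and return a separated (_AND_ or _OR_) and a list of the component features that make up the clause",
--          "return": "Separator and list of features that make up a clause",
--          "examples": ["parsed_clauses = parse_custom_clause(myclauses)"],
--          "args": [{"name": "cclause", "default": "NA", "required": "True", "type": "string", "desc": "Custom clause as a string"}
--                   ],
--          "integration": "",
--          "instance": "",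
--          "access_instructions": "",
--          "dependent_functions": "",
--          "limitations": [""]
--          }
--     """
--     ret_items = []
--     ret_sep = "Err:General Error"
--     if cclause.find("_OR_") < 0 and cclause.find("_AND_") < 0:
--         ret_sep = f"Err:_AND_ or _OR_ Not Found in {cclause} must include _AND_ or _OR_ (note case)"
--     elif cclause.find("_OR_") >= 0 and cclause.find("_AND_") >= 0:
--         ret_sep = f"Err:_AND_ and _OR_ Both Found in {cclause} Must Select one or the other"
--     else:
--         ret_sep = "_AND_"
--         if cclause.find("_OR_") >= 0:
--             ret_sep = "_OR_"
--         ret_items = cclause.split(ret_sep)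
--     return ret_sep, ret_items
--
-- def ret_custom_clause_group(cc, this_feat_dict):
--     """ {"name": "ret_custom_clause_group",
--          "desc": "Take a custom clause and feature dict and get the group it belongs to. If all clauses are the same group, return that, else return 'Compound Groups'",
--          "return": "Group name as a string",
--          "examples": ["clause_group = ret_custom_clause_group(myclause, feat_dict)"],
--          "args": [{"name": "cc", "default": "NA", "required": "True", "type": "string", "desc": "Custom clause as a string"},
--                   {"name": "this_feat_dict", "default": "NA", "required": "True", "type": "dict", "desc": "Dictionary of features that include the individual clauses"}
--                   ],
--          "integration": "",
--          "instance": "",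
--          "access_instructions": "",
--          "dependent_functions": "",
--          "limitations": ["Only returns a group if all clauses are in the group, otherwise returns static Compound Groups"]
--          }
--     """
--
--
--     ret_grp = "non_calc"
--     clause_op, clause_items = parse_custom_clause(cc)
--     if clause_op.find("Err") < 0:
--         mygroups = []
--         for i in clause_items:
--             if i in this_feat_dict:
--                 mygroups.append(this_feat_dict[i]['group'])
--         mygroups = list(set(mygroups))
--         if len(mygroups) == 1:
--             ret_grp = mygroups[0]
--         else:
--             ret_grp = "Compound Groups"
--     return ret_grp
-- ===== SOURCE B (Python) =====
-- def ret_custom_clause_group(cc, this_feat_dict):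
--     has_or = "_OR_" in cc
--     has_and = "_AND_" in cc
--     if has_or == has_and:
--         return "non_calc"
--     common = None
--     for item in cc.split("_OR_" if has_or else "_AND_"):
--         feat = this_feat_dict.get(item)
--         if feat is None:
--             continue
--         grp = feat['group']
--         if common is None:
--             common = grp
--         elif grp != common:
--             return "Compound Groups"
--     return common if common is not None else "Compound Groups"
-- ===== Notes on version B (the rewrite author's own statement) =====
-- stated objective: simpler
-- what changed: B drops A's separate parse helper, error-string construction and list/set accumulation: it decides the separator by two substring tests and does one scan over the split items keeping a running common group, returning 'Compound Groups' on the first differing group.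
import Mathlib
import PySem

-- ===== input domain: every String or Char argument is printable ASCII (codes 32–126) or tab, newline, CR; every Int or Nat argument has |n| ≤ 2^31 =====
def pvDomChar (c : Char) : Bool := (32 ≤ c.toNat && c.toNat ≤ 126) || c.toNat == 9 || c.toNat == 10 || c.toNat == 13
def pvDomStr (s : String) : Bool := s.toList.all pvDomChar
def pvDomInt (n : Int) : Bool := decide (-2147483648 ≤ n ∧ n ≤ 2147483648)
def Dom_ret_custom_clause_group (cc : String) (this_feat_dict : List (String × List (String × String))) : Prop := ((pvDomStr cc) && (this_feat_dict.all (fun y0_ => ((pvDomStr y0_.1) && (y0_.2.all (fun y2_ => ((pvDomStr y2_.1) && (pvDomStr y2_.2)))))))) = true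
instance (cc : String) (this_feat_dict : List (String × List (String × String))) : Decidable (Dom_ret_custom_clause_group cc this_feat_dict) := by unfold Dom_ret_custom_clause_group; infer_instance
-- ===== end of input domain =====

-- B replaces A's collect-into-list/set-then-count pass by a single scan with a running
-- `common` group and an early exit on the first mismatch (objective: simpler).

-- ===== PORT A =====
-- `list(set(mygroups))` is ported as PySem.Set.ofList; its result is consumed only via
-- length and, when the length is 1, its unique element — both independent of set order.
def parse_custom_clause (cclause : String) : String × List String :=
  let ret_items : List String := []
  if PySem.Str.find cclause "_OR_" < 0 ∧ PySem.Str.find cclause "_AND_" < 0 then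
    ("Err:_AND_ or _OR_ Not Found in " ++ cclause ++ " must include _AND_ or _OR_ (note case)", ret_items)
  else if 0 ≤ PySem.Str.find cclause "_OR_" ∧ 0 ≤ PySem.Str.find cclause "_AND_" then
    ("Err:_AND_ and _OR_ Both Found in " ++ cclause ++ " Must Select one or the other", ret_items)
  else
    let ret_sep := "_AND_"
    let ret_sep := if 0 ≤ PySem.Str.find cclause "_OR_" then "_OR_" else ret_sep
    (ret_sep, (PySem.Str.split? cclause ret_sep).getD [])

def ret_custom_clause_group (cc : String) (this_feat_dict : List (String × List (String × String))) : String :=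
  let ret_grp := "non_calc"
  let parsed := parse_custom_clause cc
  let clause_op := parsed.1
  let clause_items := parsed.2
  if PySem.Str.find clause_op "Err" < 0 then
    let fd := PySem.Dict.ofList this_feat_dict
    -- `this_feat_dict[i]['group']`: the `.getD` defaults are unreachable under
    -- Pre_ (the key was just tested / the inner dict has a "group" key there).
    let mygroups : List String := clause_items.foldl (fun acc i =>
      if fd.contains i then
        acc ++ [((PySem.Dict.ofList ((fd.get? i).getD [])).get? "group").getD ""]
      else acc) []
    let mygroups := PySem.Set.ofList mygroups
    if mygroups.length = 1 then (PySem.List.pyGet? mygroups 0).getD "" else "Compound Groups"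
  else ret_grp

-- ===== PORT B =====
-- single scan: `common` is the group seen so far; first differing group returns early
def altScan (fd : PySem.Dict String (List (String × String))) :
    List String → Option String → String
  | [], common => match common with | some c => c | none => "Compound Groups"
  | i :: rest, common =>
    match fd.get? i with
    | none => altScan fd rest common
    | some feat =>
      let grp := ((PySem.Dict.ofList feat).get? "group").getD ""   -- feat['group'] (Pre_: present)
      match common with
      | none => altScan fd rest (some grp)
      | some c => if grp ≠ c then "Compound Groups" else altScan fd rest (some c)

def ret_custom_clause_group_alt (cc : String) (this_feat_dict : List (String × List (String × String))) : String :=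
  let hasOr := PySem.Str.isIn "_OR_" cc
  let hasAnd := PySem.Str.isIn "_AND_" cc
  if hasOr == hasAnd then "non_calc"
  else
    altScan (PySem.Dict.ofList this_feat_dict)
      ((PySem.Str.split? cc (if hasOr then "_OR_" else "_AND_")).getD []) none

-- ===== PRECONDITION & SPEC =====
-- Pre_ excludes exactly the inputs where the Python A raises KeyError: a clause item that
-- is a key of the dict whose feature dict has no "group" key.  (When the clause parse
-- errors out no lookup happens, so nothing is required then.)
def Pre_ret_custom_clause_group (cc : String) (this_feat_dict : List (String × List (String × String))) : Prop :=
  (let hasOr := PySem.Str.isIn "_OR_" cc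
   let hasAnd := PySem.Str.isIn "_AND_" cc
   hasOr == hasAnd ||
     ((PySem.Str.split? cc (if hasOr then "_OR_" else "_AND_")).getD []).all (fun i =>
       (((PySem.Dict.ofList this_feat_dict).get? i).map
         (fun v => (PySem.Dict.ofList v).contains "group")).getD true)) = true
instance (cc : String) (this_feat_dict : List (String × List (String × String))) : Decidable (Pre_ret_custom_clause_group cc this_feat_dict) := by unfold Pre_ret_custom_clause_group; infer_instance

def pvWitness_ret_custom_clause_group : String × (List (String × List (String × String))) :=
  ("a_OR_b", [("a", [("group", "g1")]), ("b", [("group", "g1")])])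

def Spec_ret_custom_clause_group (cc : String) (this_feat_dict : List (String × List (String × String))) (out : String) : Prop := out = ret_custom_clause_group_alt cc this_feat_dict
instance (cc : String) (this_feat_dict : List (String × List (String × String))) (out : String) : Decidable (Spec_ret_custom_clause_group cc this_feat_dict out) := by unfold Spec_ret_custom_clause_group; infer_instance

-- ===== CLAIM (what is proved, stated in full; the proofs are below) =====
def Claim_equal_ret_custom_clause_group : Prop := ∀ (cc : String) (this_feat_dict : List (String × List (String × String))), Dom_ret_custom_clause_group cc this_feat_dict → Pre_ret_custom_clause_group cc this_feat_dict → Spec_ret_custom_clause_group cc this_feat_dict (ret_custom_clause_group cc this_feat_dict)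

-- ===== LEMMAS AND PROOFS =====

-- group-value read for item i, as A's fold computes it
def grpOf (fd : PySem.Dict String (List (String × String))) (i : String) : String :=
  ((PySem.Dict.ofList ((fd.get? i).getD [])).get? "group").getD ""

-- B's scan, restated over the precomputed list of groups
def scan : List String → Option String → String
  | [], some c => c
  | [], none => "Compound Groups"
  | g :: t, none => scan t (some g)
  | g :: t, some c => if g ≠ c then "Compound Groups" else scan t (some c)

lemma altScan_eq_scan (fd : PySem.Dict String (List (String × String))) :
    ∀ (items : List String) (common : Option String),
      altScan fd items common
        = scan ((items.filter (fun i => fd.contains i)).map (grpOf fd)) common := by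
  intro items
  induction items with
  | nil => intro common; cases common <;> simp [altScan, scan]
  | cons i rest ih =>
    intro common
    rcases h : fd.get? i with _ | feat
    · have hc : fd.contains i = false := by
        rw [PySem.Dict.contains_eq_isSome_get?, h]; rfl
      cases common <;> simp [altScan, h, hc, ih]
    · have hc : fd.contains i = true := by
        rw [PySem.Dict.contains_eq_isSome_get?, h]; rfl
      have hg : grpOf fd i = ((PySem.Dict.ofList feat).get? "group").getD "" := by
        simp [grpOf, h]
      cases common with
      | none => simp [altScan, h, hc, hg, ih, scan]
      | some c =>
        by_cases hne : ((PySem.Dict.ofList feat).get? "group").getD "" = c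
        · simp [altScan, h, hc, hg, hne, ih, scan]
        · simp [altScan, h, hc, hg, hne, scan]

lemma scan_some (t : List String) (c : String) :
    scan t (some c) = if t.all (· == c) then c else "Compound Groups" := by
  induction t with
  | nil => rfl
  | cons g t ih =>
    by_cases hg : g = c
    · simp [scan, hg, ih]
    · simp [scan, hg, beq_iff_eq]

lemma nodup_all_eq {l : List String} {g : String} (hnd : l.Nodup)
    (hall : ∀ x ∈ l, x = g) (hmem : g ∈ l) : l = [g] := by
  cases l with
  | nil => cases hmem
  | cons a rest =>
    have ha : a = g := hall a (by simp)
    subst ha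
    have : rest = [] := by
      cases rest with
      | nil => rfl
      | cons b rb =>
        have hb : b = a := hall b (by simp)
        subst hb
        exact absurd (by simp : b ∈ b :: rb) (by simpa using (List.nodup_cons.mp hnd).1)
    simp [this]

lemma set_branch_eq_scan (gs : List String) :
    (if (PySem.Set.ofList gs).length = 1
       then (PySem.List.pyGet? (PySem.Set.ofList gs) 0).getD ""
       else "Compound Groups")
      = scan gs none := by
  cases gs with
  | nil => rfl
  | cons g t =>
    have hmem : ∀ x : String, x ∈ PySem.Set.ofList (g :: t) ↔ x ∈ g :: t := by
      intro x
      exact PySem.Set.mem_ofList (g :: t) x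
    have hnd : (PySem.Set.ofList (g :: t)).Nodup := PySem.Set.nodup_ofList (g :: t)
    rw [show scan (g :: t) none = scan t (some g) from rfl, scan_some]
    by_cases hall : ∀ x ∈ t, x = g
    · have heq : PySem.Set.ofList (g :: t) = [g] := by
        refine nodup_all_eq hnd ?_ ((hmem g).mpr (by simp))
        intro x hx
        rcases List.mem_cons.mp ((hmem x).mp hx) with h | h
        · exact h
        · exact hall x h
      rw [heq]
      have hb : t.all (· == g) = true := by
        simp only [List.all_eq_true, beq_iff_eq]; exact hall
      simp [hb, PySem.List.pyGet?, PySem.List.pyIdx?]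
    · push Not at hall
      rcases hall with ⟨x, hx, hxg⟩
      have hlen : (PySem.Set.ofList (g :: t)).length ≠ 1 := by
        intro h1
        rcases List.length_eq_one_iff.mp h1 with ⟨a, ha⟩
        have hga : g = a := by
          have := (hmem g).mpr (by simp)
          rw [ha] at this; simpa using this
        have hxa : x = a := by
          have := (hmem x).mpr (by simp [hx])
          rw [ha] at this; simpa using this
        exact hxg (hxa.trans hga.symm)
      have hb : t.all (· == g) = false := by
        simp only [List.all_eq_false]
        exact ⟨x, hx, by simpa using hxg⟩
      simp [hlen, hb]

lemma err_find_nonneg (a cc b : String) (h : ['E', 'r', 'r'] <+: a.toList) :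
    0 ≤ PySem.Str.find (a ++ cc ++ b) "Err" := by
  rw [PySem.Str.find_nonneg_iff]
  refine List.IsPrefix.isInfix ?_
  have he : ("Err" : String).toList = ['E', 'r', 'r'] := rfl
  rw [he, String.toList_append, String.toList_append]
  exact h.trans ((List.prefix_append _ _).trans (List.prefix_append _ _))

lemma find_nonneg_iff_isIn (cc sub : String) :
    0 ≤ PySem.Str.find cc sub ↔ PySem.Str.isIn sub cc = true := by
  rw [PySem.Str.find_nonneg_iff, PySem.Str.isIn_iff_infix]

lemma parse_none (cc : String) (h1 : PySem.Str.find cc "_OR_" < 0)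
    (h2 : PySem.Str.find cc "_AND_" < 0) :
    parse_custom_clause cc
      = ("Err:_AND_ or _OR_ Not Found in " ++ cc ++ " must include _AND_ or _OR_ (note case)", []) := by
  simp only [parse_custom_clause]
  rw [if_pos ⟨h1, h2⟩]

lemma parse_both (cc : String) (h1 : 0 ≤ PySem.Str.find cc "_OR_")
    (h2 : 0 ≤ PySem.Str.find cc "_AND_") :
    parse_custom_clause cc
      = ("Err:_AND_ and _OR_ Both Found in " ++ cc ++ " Must Select one or the other", []) := by
  simp only [parse_custom_clause]
  rw [if_neg (by omega : ¬ (PySem.Str.find cc "_OR_" < 0 ∧ PySem.Str.find cc "_AND_" < 0)),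
    if_pos ⟨h1, h2⟩]

lemma parse_or (cc : String) (h1 : 0 ≤ PySem.Str.find cc "_OR_")
    (h2 : PySem.Str.find cc "_AND_" < 0) :
    parse_custom_clause cc = ("_OR_", (PySem.Str.split? cc "_OR_").getD []) := by
  simp only [parse_custom_clause]
  rw [if_neg (by omega : ¬ (PySem.Str.find cc "_OR_" < 0 ∧ PySem.Str.find cc "_AND_" < 0)),
    if_neg (by omega : ¬ (0 ≤ PySem.Str.find cc "_OR_" ∧ 0 ≤ PySem.Str.find cc "_AND_")),
    if_pos h1]

lemma parse_and (cc : String) (h1 : PySem.Str.find cc "_OR_" < 0)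
    (h2 : 0 ≤ PySem.Str.find cc "_AND_") :
    parse_custom_clause cc = ("_AND_", (PySem.Str.split? cc "_AND_").getD []) := by
  simp only [parse_custom_clause]
  rw [if_neg (by omega : ¬ (PySem.Str.find cc "_OR_" < 0 ∧ PySem.Str.find cc "_AND_" < 0)),
    if_neg (by omega : ¬ (0 ≤ PySem.Str.find cc "_OR_" ∧ 0 ≤ PySem.Str.find cc "_AND_")),
    if_neg (not_le.mpr h1)]

-- the non-error case, for any item list
lemma body_eq (d : List (String × List (String × String))) (items : List String) :
    (if (PySem.Set.ofList (items.foldl (fun acc i =>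
          if (PySem.Dict.ofList d).contains i then
            acc ++ [((PySem.Dict.ofList (((PySem.Dict.ofList d).get? i).getD [])).get? "group").getD ""]
          else acc) [])).length = 1
       then (PySem.List.pyGet? (PySem.Set.ofList (items.foldl (fun acc i =>
          if (PySem.Dict.ofList d).contains i then
            acc ++ [((PySem.Dict.ofList (((PySem.Dict.ofList d).get? i).getD [])).get? "group").getD ""]
          else acc) [])) 0).getD ""
       else "Compound Groups")
      = altScan (PySem.Dict.ofList d) items none := by
  have hfold : items.foldl (fun acc i =>
      if (PySem.Dict.ofList d).contains i then
        acc ++ [((PySem.Dict.ofList (((PySem.Dict.ofList d).get? i).getD [])).get? "group").getD ""]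
      else acc) []
      = (items.filter (fun i => (PySem.Dict.ofList d).contains i)).map (grpOf (PySem.Dict.ofList d)) := by
    simpa [grpOf] using PySem.List.foldl_append_if (l := items)
      (p := fun i => (PySem.Dict.ofList d).contains i) (f := grpOf (PySem.Dict.ofList d)) (acc := [])
  rw [hfold, altScan_eq_scan]
  exact set_branch_eq_scan _

-- ===== VERDICT (by name: the statement is the Claim_ definition above) =====
theorem ret_custom_clause_group_spec : Claim_equal_ret_custom_clause_group := by
  intro cc d _ _
  unfold Spec_ret_custom_clause_group
  have hOrIff := find_nonneg_iff_isIn cc "_OR_"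
  have hAndIff := find_nonneg_iff_isIn cc "_AND_"
  by_cases hOr : PySem.Str.isIn "_OR_" cc = true <;>
    by_cases hAnd : PySem.Str.isIn "_AND_" cc = true
  · -- both present: A's parse errs, B sees hasOr == hasAnd
    have herr := err_find_nonneg "Err:_AND_ and _OR_ Both Found in " cc
      " Must Select one or the other" (by decide)
    simp only [ret_custom_clause_group, ret_custom_clause_group_alt,
      parse_both cc (hOrIff.mpr hOr) (hAndIff.mpr hAnd), hOr, hAnd]
    rw [if_neg (not_lt.mpr herr), if_pos (by simp)]
  · -- only _OR_
    have h2 : PySem.Str.find cc "_AND_" < 0 := by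
      by_contra h; exact hAnd (hAndIff.mp (not_lt.mp h))
    simp only [ret_custom_clause_group, ret_custom_clause_group_alt,
      parse_or cc (hOrIff.mpr hOr) h2, hOr, eq_false_of_ne_true hAnd]
    rw [if_pos (by decide : PySem.Str.find "_OR_" "Err" < 0),
      if_neg (by simp : ¬ ((true : Bool) == false) = true)]
    exact body_eq d _
  · -- only _AND_
    have h1 : PySem.Str.find cc "_OR_" < 0 := by
      by_contra h; exact hOr (hOrIff.mp (not_lt.mp h))
    simp only [ret_custom_clause_group, ret_custom_clause_group_alt,
      parse_and cc h1 (hAndIff.mpr hAnd), eq_false_of_ne_true hOr, hAnd]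
    rw [if_pos (by decide : PySem.Str.find "_AND_" "Err" < 0),
      if_neg (by simp : ¬ ((false : Bool) == true) = true)]
    exact body_eq d _
  · -- neither present: A's parse errs, B sees hasOr == hasAnd
    have h1 : PySem.Str.find cc "_OR_" < 0 := by
      by_contra h; exact hOr (hOrIff.mp (not_lt.mp h))
    have h2 : PySem.Str.find cc "_AND_" < 0 := by
      by_contra h; exact hAnd (hAndIff.mp (not_lt.mp h))
    have herr := err_find_nonneg "Err:_AND_ or _OR_ Not Found in " cc
      " must include _AND_ or _OR_ (note case)" (by decide)
    simp only [ret_custom_clause_group, ret_custom_clause_group_alt,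
      parse_none cc h1 h2, eq_false_of_ne_true hOr, eq_false_of_ne_true hAnd]
    rw [if_neg (not_lt.mpr herr), if_pos (by simp)]
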